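-- pv_equiv track=rewrite | github.com/upvalue/arete | utils/benchmark-report.py | split_selection_args
-- ===== SOURCE A (Python) =====
-- def split_selection_args(values: list[str] | None) -> list[str]:
--     if not values:
--         return []
--     parts: list[str] = []
--     for value in values:
--         for part in value.split(","):
--             stripped = part.strip()
--             if stripped:
--                 parts.append(stripped)
--     return parts
-- ===== SOURCE B (Python) =====
-- def split_selection_args(values):
--     parts = []
--     for value in values or []:
--         token = []
--         pending = []
--         for ch in value:
--             if ch == ",":
--                 if token:
--                     parts.append("".join(token))
--                 token = []
--                 pending = []
--             elif ch.isspace():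
--                 if token:
--                     pending.append(ch)
--             else:
--                 token += pending
--                 token.append(ch)
--                 pending = []
--         if token:
--             parts.append("".join(token))
--     return parts
-- ===== Notes on version B (the rewrite author's own statement) =====
-- stated objective: alternative
-- what changed: B replaces A's split(',')/strip()/filter pipeline with a single character-level state machine that scans each string once, flushing the current token at commas and handling stripping itself by buffering trailing whitespace in a pending list and dropping leading whitespace.
import Mathlib
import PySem

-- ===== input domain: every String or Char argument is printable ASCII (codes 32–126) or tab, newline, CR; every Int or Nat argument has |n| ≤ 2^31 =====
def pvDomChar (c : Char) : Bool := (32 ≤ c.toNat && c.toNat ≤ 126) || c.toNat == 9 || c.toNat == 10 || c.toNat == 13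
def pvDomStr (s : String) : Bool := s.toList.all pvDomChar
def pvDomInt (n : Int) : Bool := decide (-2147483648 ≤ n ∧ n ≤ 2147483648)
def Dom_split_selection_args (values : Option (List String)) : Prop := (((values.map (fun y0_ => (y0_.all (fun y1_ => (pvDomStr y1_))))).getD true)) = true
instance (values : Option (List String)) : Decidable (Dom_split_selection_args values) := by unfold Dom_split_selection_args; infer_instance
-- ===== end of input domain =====

-- B replaces A's split/strip/filter pipeline with a character-level state machine
-- (token + pending-whitespace buffers, flushed at commas); alternative algorithm, same value.

-- ===== PORT A =====
def split_selection_args (values : Option (List String)) : List String :=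
  match values with
  | none => []
  | some vs =>
    if vs = [] then []
    else
      vs.foldl (fun parts value =>
        ((PySem.Str.split? value ",").getD []).foldl (fun parts part =>
          let stripped := PySem.Str.strip part
          if stripped ≠ "" then parts ++ [stripped] else parts) parts) []

-- ===== PORT B =====
-- `for value in values or []` ; per char: comma → flush token, whitespace → buffer in
-- pending (only when a token has started), other → token += pending + [ch].
def split_selection_args_alt (values : Option (List String)) : List String :=
  (match values with | none => [] | some vs => vs).foldl
    (fun (parts : List String) (value : String) =>
      let st := value.toList.foldl
        (fun (st : List String × List Char × List Char) ch =>
          if ch = ',' then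
            ((if st.2.1 ≠ [] then st.1 ++ [String.ofList st.2.1] else st.1), [], [])
          else if PySem.Chars.isspace ch then
            (st.1, st.2.1, if st.2.1 ≠ [] then st.2.2 ++ [ch] else st.2.2)
          else
            (st.1, st.2.1 ++ st.2.2 ++ [ch], []))
        (parts, ([] : List Char), ([] : List Char));
      if st.2.1 ≠ [] then st.1 ++ [String.ofList st.2.1] else st.1)
    []

-- ===== PRECONDITION & SPEC =====
def Spec_split_selection_args (values : Option (List String)) (out : List String) : Prop := out = split_selection_args_alt values
instance (values : Option (List String)) (out : List String) : Decidable (Spec_split_selection_args values out) := by unfold Spec_split_selection_args; infer_instance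

-- ===== CLAIM (what is proved, stated in full; the proofs are below) =====
def Claim_equal_split_selection_args : Prop := ∀ (values : Option (List String)), Dom_split_selection_args values → Spec_split_selection_args values (split_selection_args values)

-- ===== LEMMAS AND PROOFS =====

-- Reference (fuel-free) form of Python's split on the single character ','.
def pvSplitC : List Char → List Char → List (List Char)
  | [], cur => [cur.reverse]
  | c :: rest, cur =>
    if c = ',' then cur.reverse :: pvSplitC rest [] else pvSplitC rest (c :: cur)

theorem pvGo_eq (fuel : Nat) :
    ∀ (l cur : List Char) (acc : List (List Char)), l.length ≤ fuel →
      PySem.Chars.splitOn.go [','] fuel l cur acc = acc.reverse ++ pvSplitC l cur := by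
  induction fuel with
  | zero =>
    intro l cur acc h
    have hl : l = [] := List.eq_nil_of_length_eq_zero (Nat.le_zero.mp h)
    subst hl
    simp [PySem.Chars.splitOn.go, pvSplitC]
  | succ n ih =>
    intro l cur acc h
    cases l with
    | nil => simp [PySem.Chars.splitOn.go, pvSplitC]
    | cons c rest =>
      have hrest : rest.length ≤ n := by simpa using h
      by_cases hc : c = ','
      · subst hc
        rw [show PySem.Chars.splitOn.go [','] (n+1) (',' :: rest) cur acc
            = PySem.Chars.splitOn.go [','] n rest [] (cur.reverse :: acc) by
          simp [PySem.Chars.splitOn.go, List.isPrefixOf]]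
        rw [ih rest [] (cur.reverse :: acc) hrest]
        simp [pvSplitC]
      · rw [show PySem.Chars.splitOn.go [','] (n+1) (c :: rest) cur acc
            = PySem.Chars.splitOn.go [','] n rest (c :: cur) acc by
          simp [PySem.Chars.splitOn.go, List.isPrefixOf, Ne.symm hc]]
        rw [ih rest (c :: cur) acc hrest]
        simp [pvSplitC, hc]

theorem pvSplitOn_eq (l : List Char) :
    PySem.Chars.splitOn l [','] = pvSplitC l [] := by
  unfold PySem.Chars.splitOn
  rw [pvGo_eq (l.length + 1) l [] [] (Nat.le_succ _)]
  simp

-- String-level split on ",": unfold PySem.Str.split? to the Chars form.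
theorem pvSplitS_eq (s : String) :
    (PySem.Str.split? s ",").getD [] =
      (PySem.Chars.splitOn s.toList [',']).map String.ofList := by
  simp [PySem.Str.split?, PySem.Chars.split?]

-- A's inner loop appends the stripped non-empty parts.
theorem pvInner_eq (l : List String) :
    ∀ (acc : List String),
      l.foldl (fun parts part =>
          let stripped := PySem.Str.strip part
          if stripped ≠ "" then parts ++ [stripped] else parts) acc
        = acc ++ (l.map PySem.Str.strip).filter (fun s => s ≠ "") := by
  induction l with
  | nil => intro acc; simp
  | cons x xs ih =>
    intro acc
    by_cases hx : PySem.Str.strip x ≠ ""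
    · simp only [List.foldl_cons, ih, List.map_cons, List.filter_cons]
      simp [hx]
    · simp only [List.foldl_cons, ih, List.map_cons, List.filter_cons]
      simp at hx
      simp [hx]

-- A's outer loop is a flatMap of the inner results.
theorem pvOuter_eq (vs : List String) :
    ∀ (acc : List String),
      vs.foldl (fun parts value =>
          ((PySem.Str.split? value ",").getD []).foldl (fun parts part =>
            let stripped := PySem.Str.strip part
            if stripped ≠ "" then parts ++ [stripped] else parts) parts) acc
        = acc ++ vs.flatMap (fun v =>
            ((((PySem.Str.split? v ",").getD []).map PySem.Str.strip).filter (fun s => s ≠ ""))) := by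
  induction vs with
  | nil => intro acc; simp
  | cons v rest ih =>
    intro acc
    rw [List.foldl_cons, pvInner_eq, ih, List.flatMap_cons, List.append_assoc]

-- === B side: recursion form of the scanner ===
def pvScan : List Char → List Char → List Char → List String
  | [], token, _pending => if token ≠ [] then [String.ofList token] else []
  | c :: rest, token, pending =>
    if c = ',' then (if token ≠ [] then [String.ofList token] else []) ++ pvScan rest [] []
    else if PySem.Chars.isspace c then
      pvScan rest token (if token ≠ [] then pending ++ [c] else pending)
    else pvScan rest (token ++ pending ++ [c]) []

-- B's inner foldl, flushed at the end, equals pvScan appended to the incoming parts.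
theorem pvFold_scan (l : List Char) :
    ∀ (parts : List String) (token pending : List Char),
      (let st := l.foldl
        (fun (st : List String × List Char × List Char) ch =>
          if ch = ',' then
            ((if st.2.1 ≠ [] then st.1 ++ [String.ofList st.2.1] else st.1), [], [])
          else if PySem.Chars.isspace ch then
            (st.1, st.2.1, if st.2.1 ≠ [] then st.2.2 ++ [ch] else st.2.2)
          else
            (st.1, st.2.1 ++ st.2.2 ++ [ch], []))
        (parts, token, pending);
       if st.2.1 ≠ [] then st.1 ++ [String.ofList st.2.1] else st.1)
      = parts ++ pvScan l token pending := by
  induction l with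
  | nil => intro parts token pending; by_cases h : token = [] <;> simp [pvScan, h]
  | cons c rest ih =>
    intro parts token pending
    by_cases hc : c = ','
    · subst hc
      simp only [List.foldl_cons, pvScan, ih]
      by_cases h : token = [] <;> simp [h]
    · by_cases hw : PySem.Chars.isspace c
      · simp only [List.foldl_cons, if_neg hc, if_pos hw, pvScan, ih]
      · simp only [List.foldl_cons, if_neg hc, if_neg hw, pvScan, ih]

-- token invariant: empty, or begins and ends with a non-whitespace character.
def pvInv (token : List Char) : Prop :=
  token = [] ∨ ((∃ h, token.head? = some h ∧ PySem.Chars.isspace h = false) ∧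
                (∃ g, token.getLast? = some g ∧ PySem.Chars.isspace g = false))

theorem pvDropWhile_pre {a : List Char} (b : List Char) (h : a.all PySem.Chars.isspace = true) :
    (a ++ b).dropWhile PySem.Chars.isspace = b.dropWhile PySem.Chars.isspace := by
  induction a with
  | nil => simp
  | cons c t ih =>
    simp only [List.all_cons, Bool.and_eq_true] at h
    simp [h.1, ih h.2]

theorem pvDropWhile_head {l : List Char} {g : Char} (h : l.head? = some g)
    (hg : PySem.Chars.isspace g = false) : l.dropWhile PySem.Chars.isspace = l := by
  cases l with
  | nil => cases h
  | cons a t =>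
    simp only [List.head?_cons, Option.some.injEq] at h
    subst h
    simp [hg]

theorem pvOfList_ne {t : List Char} (h : t ≠ []) : String.ofList t ≠ "" := by
  intro he
  exact h (by simpa using congrArg String.toList he)

theorem pvStrip_decomp (lw token pending : List Char)
    (hlw : lw.all PySem.Chars.isspace = true) (hp : pending.all PySem.Chars.isspace = true)
    (hinv : pvInv token) :
    PySem.Chars.strip (lw ++ token ++ pending) = token := by
  unfold PySem.Chars.strip PySem.Chars.lstrip PySem.Chars.rstrip
  rcases hinv with h0 | ⟨⟨h, hh, hws⟩, ⟨g, hg, gws⟩⟩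
  · subst h0
    have hall : (lw ++ pending).all PySem.Chars.isspace = true := by
      simp [List.all_append, hlw, hp]
    have : (lw ++ pending).dropWhile PySem.Chars.isspace = [] := by
      rw [pvDropWhile_pre pending hlw]
      simpa using pvDropWhile_pre [] hp
    simp [this]
  · have hhead : (token ++ pending).head? = some h := by
      cases token with
      | nil => cases hh
      | cons a t => simpa using hh
    rw [List.append_assoc, pvDropWhile_pre (token ++ pending) hlw,
      pvDropWhile_head hhead hws, List.reverse_append,
      pvDropWhile_pre token.reverse (by simpa using hp),
      pvDropWhile_head (by simpa using hg) gws, List.reverse_reverse]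

-- The scanner computes exactly split-then-strip-then-filter, given the invariant.
theorem pvScan_eq (l : List Char) :
    ∀ (lw token pending : List Char),
      lw.all PySem.Chars.isspace = true → pending.all PySem.Chars.isspace = true →
      (token = [] → pending = []) → pvInv token →
      pvScan l token pending =
        ((pvSplitC l (pending.reverse ++ token.reverse ++ lw.reverse)).map
          (fun s => String.ofList (PySem.Chars.strip s))).filter (fun s => s ≠ "") := by
  induction l with
  | nil =>
    intro lw token pending hlw hp hte hinv
    simp only [pvScan, pvSplitC, List.map_cons, List.map_nil, List.filter_cons, List.filter_nil]
    rw [show (pending.reverse ++ token.reverse ++ lw.reverse).reverse = lw ++ token ++ pending by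
      simp]
    rw [pvStrip_decomp lw token pending hlw hp hinv]
    by_cases h : token = []
    · subst h; simp
    · simp [h, pvOfList_ne h]
  | cons c rest ih =>
    intro lw token pending hlw hp hte hinv
    by_cases hc : c = ','
    · subst hc
      simp only [pvScan]
      rw [show pvSplitC (',' :: rest) (pending.reverse ++ token.reverse ++ lw.reverse)
          = (pending.reverse ++ token.reverse ++ lw.reverse).reverse :: pvSplitC rest [] by
        simp [pvSplitC]]
      rw [ih [] [] [] rfl rfl (fun _ => rfl) (Or.inl rfl)]
      simp only [List.map_cons, List.filter_cons, List.reverse_nil, List.append_nil]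
      rw [show (pending.reverse ++ token.reverse ++ lw.reverse).reverse = lw ++ token ++ pending by
        simp]
      rw [pvStrip_decomp lw token pending hlw hp hinv]
      by_cases h : token = []
      · subst h; simp
      · simp [h, pvOfList_ne h]
    · have hsplit : pvSplitC (c :: rest) (pending.reverse ++ token.reverse ++ lw.reverse)
          = pvSplitC rest (c :: (pending.reverse ++ token.reverse ++ lw.reverse)) := by
        simp [pvSplitC, hc]
      by_cases hw : PySem.Chars.isspace c
      · simp only [pvScan, if_neg hc, if_pos hw]
        rw [hsplit]
        by_cases ht : token = []
        · have hpe := hte ht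
          subst ht; subst hpe
          rw [show pvScan rest [] (if ([] : List Char) ≠ [] then [] ++ [c] else []) =
              pvScan rest [] [] by simp]
          rw [ih (lw ++ [c]) [] [] (by simp [List.all_append, hlw, hw]) rfl
            (fun _ => rfl) (Or.inl rfl)]
          simp
        · rw [if_pos ht,
            ih lw token (pending ++ [c]) hlw (by simp [List.all_append, hp, hw])
              (fun h => absurd h ht) hinv]
          simp
      · simp only [pvScan, if_neg hc, if_neg hw]
        rw [hsplit]
        have hinv' : pvInv (token ++ pending ++ [c]) := by
          right
          constructor
          · by_cases ht : token = []
            · have hpe := hte ht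
              subst ht; subst hpe
              exact ⟨c, by simp, by simpa using hw⟩
            · rcases hinv with h0 | ⟨⟨h, hh, hws⟩, _⟩
              · exact absurd h0 ht
              · refine ⟨h, ?_, hws⟩
                cases token with
                | nil => cases hh
                | cons a t => simpa using hh
          · exact ⟨c, by simp, by simpa using hw⟩
        rw [ih lw (token ++ pending ++ [c]) [] hlw rfl (by simp) hinv']
        congr 2
        simp

-- Any foldl whose step appends a per-element block is a flatMap.
theorem pvFoldl_flat (g : String → List String) (f : List String → String → List String)
    (h : ∀ acc v, f acc v = acc ++ g v) :
    ∀ (vs : List String) (acc : List String), vs.foldl f acc = acc ++ vs.flatMap g := by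
  intro vs
  induction vs with
  | nil => intro acc; simp
  | cons v rest ih =>
    intro acc
    rw [List.foldl_cons, h, ih, List.flatMap_cons, List.append_assoc]

-- Per value: the scanner equals A's split/strip/filter of that value.
theorem pvValue_eq (v : String) :
    pvScan v.toList [] [] =
      ((((PySem.Str.split? v ",").getD []).map PySem.Str.strip).filter (fun s => s ≠ "")) := by
  rw [pvSplitS_eq, pvSplitOn_eq,
    pvScan_eq v.toList [] [] [] rfl rfl (fun _ => rfl) (Or.inl rfl)]
  simp only [List.reverse_nil, List.nil_append, List.map_map]
  refine congrArg _ (List.map_congr_left fun s _ => ?_)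
  simp [Function.comp, PySem.Str.strip]

-- ===== VERDICT (by name: the statement is the Claim_ definition above) =====
theorem split_selection_args_spec : Claim_equal_split_selection_args := by
  intro values _
  unfold Spec_split_selection_args split_selection_args split_selection_args_alt
  cases values with
  | none => rfl
  | some vs =>
    by_cases hvs : vs = []
    · simp [hvs]
    · simp only [hvs, ite_false]
      rw [pvOuter_eq,
        pvFoldl_flat (fun v => pvScan v.toList [] []) _
          (fun acc v => pvFold_scan v.toList acc [] []) vs []]
      simp only [List.nil_append]
      exact congrArg (fun g => List.flatMap g vs) (funext fun v => (pvValue_eq v).symm)
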